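-- pv_equiv track=rewrite | github.com/massimotassinari/metro_travel_dijkstra | functions.py | get_airports
-- ===== SOURCE A (Python) =====
-- def get_airports(lista):
--     """
--     lista ==> lista obtenida del csv de vuelos
--
--     Retorna una lista de los aerepuertos a traves de la lista
--     obtenida de la lectura del cvs de vuelos origen-destino-costo"""
--     airports = set()
--     for x in lista:
--         airports.add(x[0])
--         airports.add(x[1])
--
--     airports = list(airports)
--     airports = sorted(airports)
--     return airports
-- ===== SOURCE B (Python) =====
-- def get_airports(lista):
--     codes = []
--     for x in lista:
--         codes.append(x[0])
--         codes.append(x[1])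
--     codes = sorted(codes)
--     out = []
--     for c in codes:
--         if not out or out[-1] != c:
--             out.append(c)
--     return out
-- ===== Notes on version B (the rewrite author's own statement) =====
-- stated objective: alternative
-- what changed: B flattens all codes into one list, sorts it, and deduplicates by a single adjacency pass instead of maintaining a hash set and sorting its distinct elements.
import Mathlib
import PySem

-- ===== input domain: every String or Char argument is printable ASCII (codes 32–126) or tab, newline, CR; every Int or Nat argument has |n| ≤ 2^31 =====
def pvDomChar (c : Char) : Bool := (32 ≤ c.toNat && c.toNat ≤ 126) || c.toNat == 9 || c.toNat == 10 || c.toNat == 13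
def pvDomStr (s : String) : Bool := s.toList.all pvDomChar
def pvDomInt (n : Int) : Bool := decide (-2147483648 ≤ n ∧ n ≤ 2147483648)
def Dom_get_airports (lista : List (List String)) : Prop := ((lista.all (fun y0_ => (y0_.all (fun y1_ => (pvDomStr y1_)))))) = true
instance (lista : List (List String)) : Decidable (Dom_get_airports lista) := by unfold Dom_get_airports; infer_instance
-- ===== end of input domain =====

-- B replaces A's hash set + final sort by flatten-all-codes, sort, then a single
-- adjacency pass that drops repeated neighbours (alternative decomposition, same cost).

-- ===== PORT A =====
-- set built by .add per row (x[0], x[1]); list(...) then sorted(...)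
def get_airports (lista : List (List String)) : List String :=
  let airports : PySem.Set String :=
    lista.foldl (fun s x =>
      PySem.Set.add (PySem.Set.add s (PySem.List.pyGetD x 0 ""))
        (PySem.List.pyGetD x 1 "")) PySem.Set.empty
  let airports : List String := airports
  let airports := PySem.List.sorted airports (fun a => a) false
  airports

-- ===== PORT B =====
-- flatten every row's two codes, sort the full list, dedup adjacent duplicates
def get_airports_alt (lista : List (List String)) : List String :=
  let codes : List String :=
    lista.foldl (fun acc x =>
      acc ++ [PySem.List.pyGetD x 0 "", PySem.List.pyGetD x 1 ""]) []
  let codes := PySem.List.sorted codes (fun a => a) false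
  codes.foldl (fun out c =>
    if out = [] ∨ PySem.List.pyGetD out (-1) "" ≠ c then out ++ [c] else out) []

-- ===== PRECONDITION & SPEC =====
-- Pre_ excludes rows with fewer than 2 entries, on which A raises IndexError (x[1], or x[0]).
def Pre_get_airports (lista : List (List String)) : Prop :=
  ∀ x ∈ lista, 2 ≤ x.length
instance (lista : List (List String)) : Decidable (Pre_get_airports lista) := by
  unfold Pre_get_airports; infer_instance
def pvWitness_get_airports : List (List String) := [["MAD", "BCN"], ["BCN", "MAD"]]

def Spec_get_airports (lista : List (List String)) (out : List String) : Prop := out = get_airports_alt lista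
instance (lista : List (List String)) (out : List String) : Decidable (Spec_get_airports lista out) := by unfold Spec_get_airports; infer_instance

-- ===== CLAIM (what is proved, stated in full; the proofs are below) =====
def Claim_equal_get_airports : Prop := ∀ (lista : List (List String)), Dom_get_airports lista → Pre_get_airports lista → Spec_get_airports lista (get_airports lista)

-- ===== LEMMAS AND PROOFS =====

-- recursive view of B's adjacency-dedup loop: `last` is the previously emitted code
def pvDdg : Option String → List String → List String
  | _, [] => []
  | last, c :: t => if last = some c then pvDdg last t else c :: pvDdg (some c) t

lemma pvStep_eq (out : List String) (c : String) :
    (if out = [] ∨ PySem.List.pyGetD out (-1) "" ≠ c then out ++ [c] else out)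
      = if out.getLast? = some c then out else out ++ [c] := by
  rcases out.eq_nil_or_concat with h | ⟨ys, y, rfl⟩
  · subst h; simp
  · simp only [List.concat_eq_append]
    have hne : ys ++ [y] ≠ [] := by simp
    rw [PySem.List.pyGetD_neg_one _ _ hne]
    simp

lemma pvFoldl_eq_ddg (l : List String) (acc : List String) :
    l.foldl (fun out c =>
      if out = [] ∨ PySem.List.pyGetD out (-1) "" ≠ c then out ++ [c] else out) acc
      = acc ++ pvDdg acc.getLast? l := by
  have hf : (fun (out : List String) (c : String) =>
      if out = [] ∨ PySem.List.pyGetD out (-1) "" ≠ c then out ++ [c] else out)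
      = (fun out c => if out.getLast? = some c then out else out ++ [c]) :=
    funext fun o => funext fun c => pvStep_eq o c
  rw [hf]
  induction l generalizing acc with
  | nil => simp [pvDdg]
  | cons c t ih =>
    simp only [List.foldl_cons]
    by_cases h : acc.getLast? = some c
    · rw [if_pos h, ih]
      simp [pvDdg, h]
    · rw [if_neg h, ih]
      simp [pvDdg, h]

lemma pvDdg_spec (l : List String) (hl : l.Pairwise (· ≤ ·)) (x : String)
    (hx : ∀ b ∈ l, x ≤ b) :
    (x :: pvDdg (some x) l).Pairwise (· < ·) ∧
      (∀ a, a ∈ x :: pvDdg (some x) l ↔ a ∈ x :: l) := by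
  induction l generalizing x with
  | nil => simp [pvDdg]
  | cons c t ih =>
    have hct : ∀ b ∈ t, c ≤ b := fun b hb => (List.pairwise_cons.mp hl).1 b hb
    have ht : t.Pairwise (· ≤ ·) := (List.pairwise_cons.mp hl).2
    by_cases h : x = c
    · subst h
      have := ih ht x hct
      simp only [pvDdg, if_true]
      refine ⟨this.1, fun a => ?_⟩
      have := this.2 a
      simp only [List.mem_cons] at *
      tauto
    · have hxc : x < c := lt_of_le_of_ne (hx c (by simp)) h
      have hrec := ih ht c hct
      simp only [pvDdg]
      rw [if_neg (by simpa using h)]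
      constructor
      · refine List.pairwise_cons.mpr ⟨fun b hb => ?_, hrec.1⟩
        have hb' : b ∈ c :: t := (hrec.2 b).mp hb
        rcases List.mem_cons.mp hb' with rfl | hbt
        · exact hxc
        · exact lt_of_lt_of_le hxc (hct b hbt)
      · intro a
        have := hrec.2 a
        simp only [List.mem_cons] at *
        tauto

lemma pvDdg_none_spec (l : List String) (hl : l.Pairwise (· ≤ ·)) :
    (pvDdg none l).Pairwise (· < ·) ∧ (∀ a, a ∈ pvDdg none l ↔ a ∈ l) := by
  cases l with
  | nil => simp [pvDdg]
  | cons c t =>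
    have hct : ∀ b ∈ t, c ≤ b := fun b hb => (List.pairwise_cons.mp hl).1 b hb
    have ht : t.Pairwise (· ≤ ·) := (List.pairwise_cons.mp hl).2
    have := pvDdg_spec t ht c hct
    simp only [pvDdg, reduceCtorEq]
    exact ⟨this.1, this.2⟩

-- A's per-row double-add over the rows = folding Set.add over the flattened code list
lemma pvSetFold_eq (lista : List (List String)) (s : PySem.Set String) :
    lista.foldl (fun s x =>
      PySem.Set.add (PySem.Set.add s (PySem.List.pyGetD x 0 ""))
        (PySem.List.pyGetD x 1 "")) s
      = (lista.flatMap (fun x =>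
          [PySem.List.pyGetD x 0 "", PySem.List.pyGetD x 1 ""])).foldl PySem.Set.add s := by
  induction lista generalizing s with
  | nil => simp
  | cons x t ih => simp [List.flatMap_cons, ih]

-- ===== VERDICT (by name: the statement is the Claim_ definition above) =====
theorem get_airports_spec : Claim_equal_get_airports := by
  intro lista _ _
  unfold Spec_get_airports get_airports get_airports_alt
  simp only [PySem.List.foldl_append_eq_flatMap, List.nil_append, pvSetFold_eq,
    pvFoldl_eq_ddg, List.getLast?_nil]
  set codes := lista.flatMap (fun x =>
    [PySem.List.pyGetD x 0 "", PySem.List.pyGetD x 1 ""]) with hc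
  have hsorted := PySem.List.sorted_pairwise codes (fun a => a)
  have hspec := pvDdg_none_spec (PySem.List.sorted codes (fun a => a)) hsorted
  rw [show (PySem.Set.empty : PySem.Set String) = [] from rfl, ← PySem.Set.ofList_eq_foldl]
  refine PySem.List.sorted_eq_of_perm_of_pairwise_lt _ _ _ ?_ hspec.1
  refine (List.perm_ext_iff_of_nodup ?_ (PySem.Set.nodup_ofList codes)).mpr ?_
  · exact hspec.1.imp ne_of_lt
  · intro a
    rw [hspec.2 a, PySem.List.mem_sorted, PySem.Set.mem_ofList]
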